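-- pv_equiv track=rewrite | github.com/tempflip/math_labs | lab3/dices.py | seq_sums
-- ===== SOURCE A (Python) =====
-- def seq_sums(seq):
-- 	if len(seq) == 1 :
-- 		return set([seq[0][0], seq[0][1], seq[0][0] + seq[0][1]])
-- 	else :
-- 		r = []
-- 		for seq_sum in seq_sums(seq[0:-1]):
-- 			r.append(seq_sum + seq[-1][0])
-- 			r.append(seq_sum + seq[-1][1])
-- 			r.append(seq_sum + seq[-1][0] + seq[-1][1])
-- 		return set(r)
-- ===== SOURCE B (Python) =====
-- def seq_sums(seq):
--     a, b = seq[0]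
--     result = {a, b, a + b}
--     for a, b in seq[1:]:
--         result = {s + x for s in result for x in (a, b, a + b)}
--     return result
-- ===== Notes on version B (the rewrite author's own statement) =====
-- stated objective: simpler
-- what changed: Replaces the recursion on seq[:-1] (which rebuilds a slice and an explicit append loop at every level) with a single left-to-right loop keeping an accumulator set of reachable sums.
import Mathlib
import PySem

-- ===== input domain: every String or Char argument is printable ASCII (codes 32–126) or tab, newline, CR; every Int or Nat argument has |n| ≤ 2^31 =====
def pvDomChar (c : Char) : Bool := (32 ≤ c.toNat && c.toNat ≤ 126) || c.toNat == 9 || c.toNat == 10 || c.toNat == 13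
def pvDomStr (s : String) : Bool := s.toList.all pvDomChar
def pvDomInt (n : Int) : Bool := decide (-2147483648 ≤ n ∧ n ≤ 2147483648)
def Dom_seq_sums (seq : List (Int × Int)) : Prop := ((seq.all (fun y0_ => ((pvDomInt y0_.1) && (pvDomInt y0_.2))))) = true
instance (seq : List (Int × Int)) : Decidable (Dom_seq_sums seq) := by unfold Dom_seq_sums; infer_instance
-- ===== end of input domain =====

-- B replaces A's recursion on seq[:-1] with a single left-to-right fold over an accumulator set (simpler; return value only — both raise on empty input, excluded by Pre_).

-- ===== PORT A =====
-- literal port of A: recursion on seq[0:-1] (= dropLast, exact for any list), seq[-1] via pyGetD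
-- (the default is unreachable: the branch is only taken on nonempty seq), set(r) = PySem.Set.ofList.
def seq_sums (seq : List (Int × Int)) : List Int :=
  if seq.length = 1 then
    let p := PySem.List.pyGetD seq 0 (0, 0)
    PySem.Set.ofList [p.1, p.2, p.1 + p.2]
  else if _h : seq.length = 0 then [] -- Python A recurses forever here (RecursionError); outside Pre_
  else
    let last := PySem.List.pyGetD seq (-1) (0, 0)
    let r := (seq_sums seq.dropLast).foldl
      (fun r s => r ++ [s + last.1, s + last.2, s + last.1 + last.2]) []
    PySem.Set.ofList r
termination_by seq.length
decreasing_by simp [List.length_dropLast]; omega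

-- ===== PORT B =====
-- literal port of B: seed from seq[0], then fold the set-comprehension step over seq[1:]
def seq_sums_alt (seq : List (Int × Int)) : List Int :=
  match seq with
  | [] => []  -- Python B raises IndexError here; outside Pre_
  | p :: rest =>
    rest.foldl
      (fun res q => PySem.Set.ofList (res.flatMap fun s => [s + q.1, s + q.2, s + q.1 + q.2]))
      (PySem.Set.ofList [p.1, p.2, p.1 + p.2])

-- ===== PRECONDITION & SPEC =====
-- Pre_ excludes only the empty list, on which A raises RecursionError (and B raises IndexError).
def Pre_seq_sums (seq : List (Int × Int)) : Prop := seq ≠ []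
instance (seq : List (Int × Int)) : Decidable (Pre_seq_sums seq) := by unfold Pre_seq_sums; infer_instance
def pvWitness_seq_sums : (List (Int × Int)) := [(1, 2), (3, 4)]
def Spec_seq_sums (seq : List (Int × Int)) (out : List Int) : Prop := out = seq_sums_alt seq
instance (seq : List (Int × Int)) (out : List Int) : Decidable (Spec_seq_sums seq out) := by unfold Spec_seq_sums; infer_instance

-- ===== CLAIM =====
def Claim_equal_seq_sums : Prop := ∀ (seq : List (Int × Int)), Dom_seq_sums seq → Pre_seq_sums seq → Spec_seq_sums seq (seq_sums seq)

-- ===== LEMMAS AND PROOFS =====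

-- the common combining step
def pvStep (res : List Int) (q : Int × Int) : List Int :=
  PySem.Set.ofList (res.flatMap fun s => [s + q.1, s + q.2, s + q.1 + q.2])

theorem seq_sums_alt_cons (p : Int × Int) (rest : List (Int × Int)) :
    seq_sums_alt (p :: rest) = rest.foldl pvStep (PySem.Set.ofList [p.1, p.2, p.1 + p.2]) := rfl

theorem seq_sums_single (p : Int × Int) :
    seq_sums [p] = PySem.Set.ofList [p.1, p.2, p.1 + p.2] := by
  rw [seq_sums.eq_def]
  simp [PySem.List.pyGetD]

theorem seq_sums_snoc (xs : List (Int × Int)) (p : Int × Int) (h : xs ≠ []) :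
    seq_sums (xs ++ [p]) = pvStep (seq_sums xs) p := by
  have hlen1 : ¬ ((xs ++ [p]).length = 1) := by
    cases xs with
    | nil => exact absurd rfl h
    | cons a t => simp
  have hlen0 : ¬ ((xs ++ [p]).length = 0) := by simp
  have hlast : PySem.List.pyGetD (xs ++ [p]) (-1) ((0 : Int), (0 : Int)) = p := by
    simp [PySem.List.pyGetD, PySem.List.pyGet?_neg_one]
  have hdrop : (xs ++ [p]).dropLast = xs := by simp
  rw [seq_sums.eq_def, if_neg hlen1, dif_neg hlen0]
  simp only [hlast, hdrop]
  rw [PySem.List.foldl_append_eq_flatMap]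
  simp [pvStep]

theorem seq_sums_eq_alt (seq : List (Int × Int)) (h : seq ≠ []) :
    seq_sums seq = seq_sums_alt seq := by
  induction seq using List.reverseRecOn with
  | nil => exact absurd rfl h
  | append_singleton xs p ih =>
    cases xs with
    | nil => simp [seq_sums_single, seq_sums_alt_cons]
    | cons a t =>
      have h1 : seq_sums ((a :: t) ++ [p]) = pvStep (seq_sums (a :: t)) p :=
        seq_sums_snoc (a :: t) p (by simp)
      have h2 : seq_sums_alt ((a :: t) ++ [p]) = pvStep (seq_sums_alt (a :: t)) p := by
        rw [List.cons_append, seq_sums_alt_cons, seq_sums_alt_cons, List.foldl_append]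
        simp
      rw [h1, h2, ih (by simp)]

-- ===== VERDICT =====
theorem seq_sums_spec : Claim_equal_seq_sums := by
  intro seq _ hpre
  exact seq_sums_eq_alt seq hpre
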